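-- pv_equiv track=rewrite | github.com/MDevVal/ECE-331x | acurite.py | lfsr_digest8
-- ===== SOURCE A (Python) =====
-- def lfsr_digest8(message, gen, key):
--     """
--     Computes an 8-bit checksum using a Linear Feedback Shift Register (LFSR).
--
--     Args:
--         message (list of int): The message bytes to compute the checksum for.
--         gen (int): The generator polynomial for the LFSR.
--         key (int): The initial key value for the LFSR.
--
--     Returns:
--         int: The computed 8-bit checksum.
--     """
--     checksum = 0
--     for byte in message:
--         for bit in range(7, -1, -1):
--             if (byte >> bit) & 1:
--                 checksum ^= key
--             if key & 1:
--                 key = (key >> 1) ^ gen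
--             else:
--                 key >>= 1
--             key &= 0xFF
--     return checksum & 0xFF
-- ===== SOURCE B (Python) =====
-- def lfsr_digest8(message, gen, key):
--     # Alternative decomposition: extract the bit stream, precompute the
--     # message-independent key schedule, then XOR-reduce over set bits.
--     bits = [(byte >> bit) & 1 for byte in message for bit in range(7, -1, -1)]
--     states = []
--     k = key
--     for _ in bits:
--         states.append(k)
--         k = ((k >> 1) ^ gen) & 0xFF if (k & 1) else (k >> 1) & 0xFF
--     checksum = 0
--     for b, s in zip(bits, states):
--         if b:
--             checksum ^= s
--     return checksum & 0xFF
-- ===== Notes on version B (the rewrite author's own statement) =====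
-- stated objective: alternative
-- what changed: A interleaves checksum update and key update in one nested loop; B first extracts the full bit stream, precomputes the message-independent key schedule as a concrete list in its own pass, then XOR-reduces the schedule entries at the set-bit positions via a zip.
import Mathlib
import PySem

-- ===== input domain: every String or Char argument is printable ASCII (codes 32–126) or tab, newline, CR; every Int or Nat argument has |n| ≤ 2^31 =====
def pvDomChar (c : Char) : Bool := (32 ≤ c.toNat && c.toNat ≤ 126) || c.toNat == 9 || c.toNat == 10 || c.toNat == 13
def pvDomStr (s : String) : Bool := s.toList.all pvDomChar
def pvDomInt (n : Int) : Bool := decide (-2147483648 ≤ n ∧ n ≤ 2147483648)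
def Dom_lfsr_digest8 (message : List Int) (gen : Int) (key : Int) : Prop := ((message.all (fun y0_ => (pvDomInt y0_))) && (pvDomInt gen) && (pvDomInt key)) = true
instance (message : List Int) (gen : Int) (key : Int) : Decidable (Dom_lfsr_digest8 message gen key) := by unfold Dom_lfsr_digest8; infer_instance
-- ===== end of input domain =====

-- B reorganises A's single interleaved loop into three passes: extract the bit
-- stream, precompute the message-independent key schedule, then XOR-reduce the
-- schedule over the set bits (objective: alternative decomposition, same cost).

-- ===== PORT A =====
def lfsr_digest8 (message : List Int) (gen : Int) (key : Int) : Int :=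
  let st := message.foldl (fun (st : Int × Int) byte =>
    (PySem.List.pyRange 7 (-1) (-1)).foldl (fun (st : Int × Int) bit =>
      let checksum := st.1
      let key := st.2
      let checksum := if PySem.Int.band (byte >>> bit.toNat) 1 ≠ 0
                      then PySem.Int.bxor checksum key else checksum
      let key := if PySem.Int.band key 1 ≠ 0
                 then PySem.Int.bxor (key >>> 1) gen else key >>> 1
      (checksum, PySem.Int.band key 0xFF)) st) (0, key)
  PySem.Int.band st.1 0xFF

-- ===== PORT B =====
def lfsr_digest8_alt (message : List Int) (gen : Int) (key : Int) : Int :=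
  let bits := message.flatMap (fun byte =>
    (PySem.List.pyRange 7 (-1) (-1)).map (fun bit => PySem.Int.band (byte >>> bit.toNat) 1))
  let states := (bits.foldl (fun (st : List Int × Int) _ =>
      let k := st.2
      let k' := if PySem.Int.band k 1 ≠ 0
                then PySem.Int.band (PySem.Int.bxor (k >>> 1) gen) 0xFF
                else PySem.Int.band (k >>> 1) 0xFF
      (st.1 ++ [k], k')) ([], key)).1
  let checksum := (bits.zip states).foldl
    (fun c p => if p.1 ≠ 0 then PySem.Int.bxor c p.2 else c) 0
  PySem.Int.band checksum 0xFF

-- ===== PRECONDITION & SPEC =====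
def Spec_lfsr_digest8 (message : List Int) (gen : Int) (key : Int) (out : Int) : Prop := out = lfsr_digest8_alt message gen key
instance (message : List Int) (gen : Int) (key : Int) (out : Int) : Decidable (Spec_lfsr_digest8 message gen key out) := by unfold Spec_lfsr_digest8; infer_instance

-- ===== CLAIM (what is proved, stated in full; the proofs are below) =====
def Claim_equal_lfsr_digest8 : Prop := ∀ (message : List Int) (gen : Int) (key : Int), Dom_lfsr_digest8 message gen key → Spec_lfsr_digest8 message gen key (lfsr_digest8 message gen key)

-- ===== LEMMAS AND PROOFS =====

-- next key value (A's two-step update, B's one-expression update: equal)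
def pvStep (gen k : Int) : Int :=
  PySem.Int.band (if PySem.Int.band k 1 ≠ 0 then PySem.Int.bxor (k >>> 1) gen else k >>> 1) 0xFF

-- one LFSR step on the (checksum, key) pair, driven by an already-extracted bit
def pvPair (gen : Int) (st : Int × Int) (b : Int) : Int × Int :=
  (if b ≠ 0 then PySem.Int.bxor st.1 st.2 else st.1, pvStep gen st.2)

-- the key schedule, recursively
def pvSched (gen : Int) : List Int → Int → List Int
  | [], _ => []
  | _ :: bs, k => k :: pvSched gen bs (pvStep gen k)



-- A's nested fold equals the pvPair fold over the extracted bit stream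
lemma a_core (gen : Int) (message : List Int) (st : Int × Int) :
    message.foldl (fun (st : Int × Int) byte =>
      (PySem.List.pyRange 7 (-1) (-1)).foldl (fun (st : Int × Int) bit =>
        let checksum := st.1
        let key := st.2
        let checksum := if PySem.Int.band (byte >>> bit.toNat) 1 ≠ 0
                        then PySem.Int.bxor checksum key else checksum
        let key := if PySem.Int.band key 1 ≠ 0
                   then PySem.Int.bxor (key >>> 1) gen else key >>> 1
        (checksum, PySem.Int.band key 0xFF)) st) st
    = (message.flatMap (fun byte =>
        (PySem.List.pyRange 7 (-1) (-1)).map (fun bit => PySem.Int.band (byte >>> bit.toNat) 1))).foldl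
        (pvPair gen) st := by
  induction message generalizing st with
  | nil => rfl
  | cons byte rest ih =>
      simp only [List.foldl_cons, List.flatMap_cons, List.foldl_append, ih]
      congr 1
      rw [List.foldl_map]
      congr 1
      funext s b
      simp only [pvPair, pvStep, Int.shiftRight_natCast_right]

-- B's schedule-building fold computes acc ++ pvSched
lemma b_sched (gen : Int) (bs : List Int) (acc : List Int) (k : Int) :
    (bs.foldl (fun (st : List Int × Int) _ =>
      let k := st.2
      let k' := if PySem.Int.band k 1 ≠ 0
                then PySem.Int.band (PySem.Int.bxor (k >>> 1) gen) 0xFF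
                else PySem.Int.band (k >>> 1) 0xFF
      (st.1 ++ [k], k')) (acc, k)).1 = acc ++ pvSched gen bs k := by
  induction bs generalizing acc k with
  | nil => simp [pvSched]
  | cons b bs ih =>
      simp only [List.foldl_cons, pvSched]
      rw [ih]
      have : (if PySem.Int.band k 1 ≠ 0
              then PySem.Int.band (PySem.Int.bxor (k >>> 1) gen) 0xFF
              else PySem.Int.band (k >>> 1) 0xFF) = pvStep gen k := by
        simp [pvStep]; split_ifs <;> rfl
      simp [this]

-- the zip-with-schedule reduction equals the pvPair fold's checksum
lemma b_zip (gen : Int) (bs : List Int) (c k : Int) :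
    (bs.zip (pvSched gen bs k)).foldl
      (fun c p => if p.1 ≠ 0 then PySem.Int.bxor c p.2 else c) c
    = (bs.foldl (pvPair gen) (c, k)).1 := by
  induction bs generalizing c k with
  | nil => rfl
  | cons b bs ih =>
      simp only [pvSched, List.zip_cons_cons, List.foldl_cons]
      rw [ih]
      rfl

-- ===== VERDICT (by name: the statement is the Claim_ definition above) =====
theorem lfsr_digest8_spec : Claim_equal_lfsr_digest8 := by
  intro message gen key _
  unfold Spec_lfsr_digest8
  simp only [lfsr_digest8, lfsr_digest8_alt]
  rw [a_core, b_sched, List.nil_append, b_zip]
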